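-- pv_equiv track=rewrite | github.com/Super262/LintCodeSolutions | problem0519.py | consistentHashing
-- ===== SOURCE A (Python) =====
-- def consistentHashing(n: int) -> list:
--     if n <= 0:
--         return []
--     cluster = [[0, 359, 1]]
--     for new_machine_label in range(2, n + 1):
--         largest_part_len = cluster[0][1] - cluster[0][0] + 1
--         largest_part_index = 0
--         for current_part_index in range(1, len(cluster)):
--             current_part_len = cluster[current_part_index][1] - cluster[current_part_index][0] + 1
--             if current_part_len > largest_part_len:
--                 largest_part_index = current_part_index
--                 largest_part_len = current_part_len
--         x = cluster[largest_part_index][0]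
--         y = cluster[largest_part_index][1]
--         mid = (x + y) // 2
--         cluster[largest_part_index][1] = mid
--         cluster.append([mid + 1, y, new_machine_label])
--     return cluster
-- ===== SOURCE B (Python) =====
-- # Bucket-by-length simulation: the circle has only 360 degrees, so at most 359
-- # splits of parts of length >= 2 are possible; after that every further machine
-- # splits the same length-1 part, which leaves it unchanged and appends an empty
-- # part — so the tail is emitted directly.  O(n) instead of A's O(n^2).
-- def consistentHashing(n: int) -> list:
--     if n <= 0:
--         return []
--     cluster = [[0, 359, 1]]
--     buckets = {360: [0]}   # part length -> indices of parts with that length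
--     curmax = 360
--     steps = min(n, 360) - 1
--     for k in range(steps):
--         label = k + 2
--         while not buckets.get(curmax):
--             curmax -= 1
--         idxs = buckets[curmax]
--         i = min(idxs)              # largest part, smallest index — A's pick
--         idxs.remove(i)
--         part = cluster[i]
--         x, y = part[0], part[1]
--         mid = (x + y) // 2
--         part[1] = mid
--         j = len(cluster)
--         cluster.append([mid + 1, y, label])
--         buckets.setdefault(mid - x + 1, []).append(i)
--         buckets.setdefault(y - mid, []).append(j)
--     if n > 360:
--         # every part now has length <= 1; splitting the first length-1 part
--         # [x0, x0] leaves it in place and appends [x0 + 1, x0, label], forever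
--         while not buckets.get(curmax):
--             curmax -= 1
--         i0 = min(buckets[curmax])
--         x0 = cluster[i0][0]
--         cluster.extend([x0 + 1, x0, label] for label in range(361, n + 1))
--     return cluster
-- ===== Notes on version B (the rewrite author's own statement) =====
-- stated objective: faster
-- what changed: Replaces A's per-machine linear scan for the largest part with a length->indices bucket table (the circle has only 360 degrees, so at most 359 real splits exist) and emits the constant tail [x0+1,x0,label] for machines beyond 360 in one pass.
import Mathlib
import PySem

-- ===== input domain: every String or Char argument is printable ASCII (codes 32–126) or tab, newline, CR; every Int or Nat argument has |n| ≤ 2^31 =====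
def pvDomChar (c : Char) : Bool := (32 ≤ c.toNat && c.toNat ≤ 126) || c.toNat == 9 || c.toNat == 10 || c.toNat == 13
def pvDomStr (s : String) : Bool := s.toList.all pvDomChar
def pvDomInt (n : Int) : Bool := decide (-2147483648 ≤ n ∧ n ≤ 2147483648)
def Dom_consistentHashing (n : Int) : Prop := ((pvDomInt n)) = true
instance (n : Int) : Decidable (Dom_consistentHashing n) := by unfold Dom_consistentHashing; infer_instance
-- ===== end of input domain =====

-- B replaces A's per-machine linear scan with a length→indices bucket table plus a
-- direct tail for machines beyond 360 (objective: faster, O(n) instead of O(n^2)).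

-- ===== PORT A =====
-- inner scan of A: `if current_part_len > largest_part_len: ...` over (index, part) pairs
def pvAscanStep (st : Int × Int) (p : Int × List Int) : Int × Int :=
  let cl := PySem.List.pyGetD p.2 1 0 - PySem.List.pyGetD p.2 0 0 + 1
  if st.2 < cl then (p.1, cl) else st

-- one iteration of A's outer `for new_machine_label in range(2, n + 1)` loop;
-- the inner `for i in range(1, len(cluster))` with its `cluster[i]` lookups is folded
-- over the same (index, element) pairs, visited in the same order
def pvAstep (cluster : List (List Int)) (label : Int) : List (List Int) :=
  let c0 := PySem.List.pyGetD cluster 0 []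
  let len0 := PySem.List.pyGetD c0 1 0 - PySem.List.pyGetD c0 0 0 + 1
  let res := ((PySem.List.enumerate cluster 0).drop 1).foldl pvAscanStep ((0 : Int), len0)
  let part := PySem.List.pyGetD cluster res.1 []
  let x := PySem.List.pyGetD part 0 0
  let y := PySem.List.pyGetD part 1 0
  let mid := PySem.Int.floordiv (x + y) 2
  PySem.List.pySetD cluster res.1 (PySem.List.pySetD part 1 mid) ++ [[mid + 1, y, label]]

def consistentHashing (n : Int) : List (List Int) :=
  if n ≤ 0 then []
  else (PySem.List.pyRange 2 (n + 1) 1).foldl pvAstep [[0, 359, 1]]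

-- ===== PORT B =====
-- `while not buckets.get(curmax): curmax -= 1`, fueled by curmax.toNat (the loop
-- always stops at a nonempty bucket in Source B; the fuel only makes it total)
def pvSkipEmptyAux (b : PySem.Dict Int (List Int)) : Nat → Int → Int
  | 0, m => m
  | fuel + 1, m => if b.getD m [] = [] then pvSkipEmptyAux b fuel (m - 1) else m

def pvSkipEmpty (b : PySem.Dict Int (List Int)) (m : Int) : Int :=
  pvSkipEmptyAux b m.toNat m

-- one iteration of Source B's `for k in range(steps)` loop; state = (cluster, buckets, curmax)
def pvBstep (st : List (List Int) × PySem.Dict Int (List Int) × Int) (k : Int) :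
    List (List Int) × PySem.Dict Int (List Int) × Int :=
  let cluster := st.1
  let buckets := st.2.1
  let label := k + 2
  let curmax := pvSkipEmpty buckets st.2.2
  let idxs := buckets.getD curmax []
  let i := ((PySem.List.min? idxs (fun v => v)).getD 0)
  let buckets1 := buckets.insert curmax ((PySem.List.remove? idxs i).getD idxs)
  let part := PySem.List.pyGetD cluster i []
  let x := PySem.List.pyGetD part 0 0
  let y := PySem.List.pyGetD part 1 0
  let mid := PySem.Int.floordiv (x + y) 2
  let cluster1 := PySem.List.pySetD cluster i (PySem.List.pySetD part 1 mid)
  let j : Int := cluster1.length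
  let cluster2 := cluster1 ++ [[mid + 1, y, label]]
  let buckets2 := buckets1.insert (mid - x + 1) ((buckets1.getD (mid - x + 1) []) ++ [i])
  let buckets3 := buckets2.insert (y - mid) ((buckets2.getD (y - mid) []) ++ [j])
  (cluster2, buckets3, curmax)

def pvBinit : List (List Int) × PySem.Dict Int (List Int) × Int :=
  ([[0, 359, 1]], PySem.Dict.empty.insert 360 [0], 360)

def consistentHashing_alt (n : Int) : List (List Int) :=
  if n ≤ 0 then []
  else
    let st := (PySem.List.pyRange 0 (min n 360 - 1) 1).foldl pvBstep pvBinit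
    if 360 < n then
      let curmax := pvSkipEmpty st.2.1 st.2.2
      let i0 := ((PySem.List.min? (st.2.1.getD curmax []) (fun v => v)).getD 0)
      let x0 := PySem.List.pyGetD (PySem.List.pyGetD st.1 i0 []) 0 0
      st.1 ++ (PySem.List.pyRange 361 (n + 1) 1).map (fun label => [x0 + 1, x0, label])
    else st.1

-- ===== PRECONDITION & SPEC =====
def Spec_consistentHashing (n : Int) (out : List (List Int)) : Prop := out = consistentHashing_alt n
instance (n : Int) (out : List (List Int)) : Decidable (Spec_consistentHashing n out) := by unfold Spec_consistentHashing; infer_instance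

-- ===== CLAIM (what is proved, stated in full; the proofs are below) =====
def Claim_equal_consistentHashing : Prop := ∀ (n : Int), Dom_consistentHashing n → Spec_consistentHashing n (consistentHashing n)

-- ===== LEMMAS AND PROOFS =====

-- length of a part [x, y, label] (Python: part[1] - part[0] + 1)
def plen (p : List Int) : Int :=
  PySem.List.pyGetD p 1 0 - PySem.List.pyGetD p 0 0 + 1

-- invariant tying B's state (cluster C, buckets Bk, bound M) after k splits to the cluster alone
def SInv (C : List (List Int)) (Bk : PySem.Dict Int (List Int)) (M : Int) (k : Nat) : Prop :=
  C.length = k + 1 ∧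
  (∀ p ∈ C, p.length = 3 ∧ 1 ≤ plen p) ∧
  (C.map plen).sum = 360 ∧
  (∀ p ∈ C, plen p ≤ M) ∧
  (∀ L : Int, ∀ x ∈ Bk.getD L [], ∃ i : Nat, i < C.length ∧ x = (i : Int) ∧ plen (C.getD i []) = L) ∧
  (∀ i : Nat, i < C.length → (i : Int) ∈ Bk.getD (plen (C.getD i [])) []) ∧
  (∀ L : Int, (Bk.getD L []).Nodup)

-- invariant of the saturated cluster (all further machines append [x0+1, x0, label])
def TInv (S : List (List Int)) (x0 : Int) : Prop :=
  S ≠ [] ∧ (∃ c : Int, S.getD 0 [] = [x0, x0, c]) ∧ (∀ p ∈ S, plen p ≤ 1)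

theorem pvAscanStep_eq (st : Int × Int) (p : Int × List Int) :
    pvAscanStep st p = if st.2 < plen p.2 then (p.1, plen p.2) else st := rfl

-- characterisation of A's inner scan (first index of the maximal length)
theorem scanAux (rest : List (List Int)) : ∀ (t li ll : Int),
    (List.foldl pvAscanStep (li, ll) (PySem.List.enumerate rest t) = (li, ll) ∧
      ∀ p ∈ rest, plen p ≤ ll) ∨
    (∃ pre q suf, rest = pre ++ q :: suf ∧
      List.foldl pvAscanStep (li, ll) (PySem.List.enumerate rest t) = (t + pre.length, plen q) ∧
      ll < plen q ∧ (∀ p ∈ pre, plen p < plen q) ∧ (∀ p ∈ suf, plen p ≤ plen q)) := by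
  induction rest with
  | nil =>
    intro t li ll
    left
    refine ⟨?_, by simp⟩
    simp [PySem.List.enumerate_nil]
  | cons p rest ih =>
    intro t li ll
    rw [PySem.List.enumerate_cons, List.foldl_cons, pvAscanStep_eq]
    by_cases h : ll < plen p
    · simp only [h, if_pos]
      rcases ih (t + 1) t (plen p) with ⟨hfold, hle⟩ | ⟨pre, q, suf, hdec, hfold, hlt, hpre, hsuf⟩
      · right
        exact ⟨[], p, rest, by simp, by simpa using hfold, h, by simp, hle⟩
      · right
        refine ⟨p :: pre, q, suf, by simp [hdec], ?_, lt_trans h hlt, ?_, hsuf⟩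
        · rw [hfold]
          congr 1
          simp
          ring
        · intro p' hp'
          rcases List.mem_cons.mp hp' with rfl | hp'
          · exact hlt
          · exact hpre p' hp'
    · simp only [h, if_neg, ite_false]
      rcases ih (t + 1) li ll with ⟨hfold, hle⟩ | ⟨pre, q, suf, hdec, hfold, hlt, hpre, hsuf⟩
      · left
        refine ⟨hfold, ?_⟩
        intro p' hp'
        rcases List.mem_cons.mp hp' with rfl | hp'
        · omega
        · exact hle p' hp'
      · right
        refine ⟨p :: pre, q, suf, by simp [hdec], ?_, hlt, ?_, hsuf⟩
        · rw [hfold]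
          congr 1
          simp
          ring
        · intro p' hp'
          rcases List.mem_cons.mp hp' with rfl | hp'
          · omega
          · exact hpre p' hp' 

theorem skipAux_eq (Bk : PySem.Dict Int (List Int)) (t : Int) :
    ∀ (fuel : Nat) (m : Int), t ≤ m → (m - t).toNat ≤ fuel →
    Bk.getD t [] ≠ [] → (∀ L : Int, t < L → L ≤ m → Bk.getD L [] = []) →
    pvSkipEmptyAux Bk fuel m = t := by
  intro fuel
  induction fuel with
  | zero =>
    intro m h1 h2 _ _
    have : m = t := by omega
    simp [pvSkipEmptyAux, this]
  | succ fuel ih =>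
    intro m h1 h2 hne hemp
    by_cases hm : m = t
    · subst hm
      simp [pvSkipEmptyAux, hne]
    · have htm : t < m := by omega
      have : Bk.getD m [] = [] := hemp m htm le_rfl
      simp only [pvSkipEmptyAux, this, if_pos]
      exact ih (m - 1) (by omega) (by omega) hne (fun L hL1 hL2 => hemp L hL1 (by omega))

theorem skip_eq (Bk : PySem.Dict Int (List Int)) (M t : Int) (h1 : 1 ≤ t) (h2 : t ≤ M)
    (hne : Bk.getD t [] ≠ []) (hemp : ∀ L : Int, t < L → L ≤ M → Bk.getD L [] = []) :
    pvSkipEmpty Bk M = t := by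
  exact skipAux_eq Bk t M.toNat M h2 (by omega) hne hemp

-- list helpers (facts specific to this file's states)
theorem getD_append_cons (xs ys : List (List Int)) (q : List Int) :
    (xs ++ q :: ys).getD xs.length [] = q := by
  induction xs with
  | nil => rfl
  | cons x xs ih => simpa using ih

theorem mem_of_mem_set (l : List (List Int)) (i : Nat) (a x : List Int) :
    x ∈ l.set i a → x = a ∨ x ∈ l := by
  induction l generalizing i with
  | nil => simp
  | cons y l ih =>
    cases i with
    | zero =>
      intro hx
      rcases List.mem_cons.mp hx with rfl | hx
      · exact Or.inl rfl
      · exact Or.inr (List.mem_cons_of_mem _ hx)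
    | succ i =>
      intro hx
      rcases List.mem_cons.mp hx with rfl | hx
      · exact Or.inr (List.mem_cons_self)
      · rcases ih i hx with h | h
        · exact Or.inl h
        · exact Or.inr (List.mem_cons_of_mem _ h)

theorem sum_map_set (l : List (List Int)) (i : Nat) (a : List Int) (h : i < l.length) :
    ((l.set i a).map plen).sum = (l.map plen).sum - plen l[i] + plen a := by
  induction l generalizing i with
  | nil => simp at h
  | cons y l ih =>
    cases i with
    | zero => simp [List.set]; ring
    | succ i =>
      have hi : i < l.length := by simpa using h
      simp only [List.set, List.map_cons, List.sum_cons, ih i hi, List.getElem_cons_succ]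
      ring

theorem all_one_of_sum_eq_length (l : List Int) :
    ∀ (h1 : ∀ x ∈ l, 1 ≤ x) (h2 : l.sum = (l.length : Int)), ∀ x ∈ l, x = 1 := by
  have key : ∀ l : List Int, (∀ x ∈ l, 1 ≤ x) → (l.length : Int) ≤ l.sum := by
    intro l
    induction l with
    | nil => simp
    | cons y l ih =>
      intro h
      have h1 : 1 ≤ y := h y List.mem_cons_self
      have h2 : (l.length : Int) ≤ l.sum := ih (fun x hx => h x (List.mem_cons_of_mem _ hx))
      simp only [List.sum_cons, List.length_cons]
      push_cast
      omega
  induction l with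
  | nil => simp
  | cons y l ih =>
    intro h1 h2 x hx
    have hy : 1 ≤ y := h1 y List.mem_cons_self
    have hrest : ∀ x ∈ l, 1 ≤ x := fun x hx => h1 x (List.mem_cons_of_mem _ hx)
    have hsum : (l.length : Int) ≤ l.sum := key l hrest
    simp only [List.sum_cons, List.length_cons] at h2
    push_cast at h2
    have hy1 : y = 1 := by omega
    have hl : l.sum = (l.length : Int) := by omega
    rcases List.mem_cons.mp hx with rfl | hx
    · exact hy1
    · exact ih hrest hl x hx

theorem exists_two_le (C : List (List Int)) (hlen : C.length ≤ 359)
    (hsum : (C.map plen).sum = 360) : ∃ p ∈ C, 2 ≤ plen p := by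
  by_contra hcon
  push_neg at hcon
  have hle : ∀ x ∈ C.map plen, x ≤ (1 : Int) := by
    intro x hx
    rcases List.mem_map.mp hx with ⟨p, hp, rfl⟩
    have := hcon p hp
    omega
  have := List.sum_le_card_nsmul (C.map plen) 1 hle
  simp only [List.length_map, nsmul_eq_mul, mul_one] at this
  omega

theorem plen_triple (a b c : Int) : plen [a, b, c] = b - a + 1 := by
  simp [plen, pysem]

theorem pyGetD3_0 (a b c d : Int) : PySem.List.pyGetD [a, b, c] 0 d = a := by simp [pysem]

theorem pyGetD3_1 (a b c d : Int) : PySem.List.pyGetD [a, b, c] 1 d = b := by simp [pysem]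

theorem pySetD3_1 (a b c v : Int) : PySem.List.pySetD [a, b, c] 1 v = [a, v, c] := by
  simp [pysem]

theorem getD_mem_of_lt (l : List (List Int)) (i : Nat) (h : i < l.length) :
    l.getD i [] ∈ l := by
  rw [List.getD_eq_getElem _ _ h]
  exact List.getElem_mem _

-- the simulation step: under the invariant, one A step equals one B step
set_option maxHeartbeats 1000000 in
theorem stepSim (C : List (List Int)) (Bk : PySem.Dict Int (List Int)) (M : Int) (k : Nat)
    (jj : Int) (h : SInv C Bk M k) (hk : k ≤ 358) :
    pvAstep C (jj + 2) = (pvBstep (C, Bk, M) jj).1 ∧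
    SInv (pvBstep (C, Bk, M) jj).1 (pvBstep (C, Bk, M) jj).2.1 (pvBstep (C, Bk, M) jj).2.2 (k + 1) := by
  obtain ⟨hlen, hparts, hsum, hM, hsound, hcomp, hnodup⟩ := h
  cases C with
  | nil => simp at hlen
  | cons c0 rest =>
  set r := List.foldl pvAscanStep ((0 : Int),
      PySem.List.pyGetD c0 1 0 - PySem.List.pyGetD c0 0 0 + 1)
      (PySem.List.enumerate rest 1) with hr
  -- characterisation of A's pick
  obtain ⟨iN, hiN, hri, hplenpick, hmax, hpref⟩ :
      ∃ iN : Nat, iN < (c0 :: rest).length ∧ r.1 = (iN : Int) ∧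
        plen ((c0 :: rest).getD iN []) = r.2 ∧ (∀ p ∈ c0 :: rest, plen p ≤ r.2) ∧
        (∀ j' : Nat, j' < iN → plen ((c0 :: rest).getD j' []) < r.2) := by
    rcases scanAux rest 1 0 (PySem.List.pyGetD c0 1 0 - PySem.List.pyGetD c0 0 0 + 1) with
      ⟨hfold, hle⟩ | ⟨pre, q, suf, hdec, hfold, hlt, hpre, hsuf⟩
    · rw [← hr] at hfold
      refine ⟨0, by simp, by simp [hfold], by simp [hfold]; rfl, ?_, by omega⟩
      intro p hp
      rcases List.mem_cons.mp hp with rfl | hp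
      · simp [hfold]; rfl
      · simpa [hfold] using hle p hp
    · rw [← hr] at hfold
      refine ⟨pre.length + 1, ?_, ?_, ?_, ?_, ?_⟩
      · simp [hdec]
      · simp [hfold]; push_cast; ring
      · rw [List.getD_cons_succ, hdec, getD_append_cons, hfold]
      · intro p hp
        rw [hfold]
        rcases List.mem_cons.mp hp with rfl | hp
        · exact le_of_lt hlt
        · rw [hdec] at hp
          rcases List.mem_append.mp hp with hp | hp
          · exact le_of_lt (hpre p hp)
          · rcases List.mem_cons.mp hp with rfl | hp
            · exact le_refl _
            · exact hsuf p hp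
      · intro j' hj'
        rw [hfold]
        cases j' with
        | zero => simpa using hlt
        | succ e =>
          have he : e < pre.length := by omega
          rw [List.getD_cons_succ, hdec, List.getD_append _ _ _ e he,
            List.getD_eq_getElem _ _ he]
          exact hpre _ (List.getElem_mem he)
  -- the maximal length is at least 2 (counting argument)
  obtain ⟨p2, hp2mem, hp2⟩ := exists_two_le (c0 :: rest) (by omega) hsum
  have hML2 : 2 ≤ r.2 := le_trans hp2 (hmax _ hp2mem)
  -- destructure the picked part
  have hmempick : (c0 :: rest).getD iN [] ∈ c0 :: rest := getD_mem_of_lt _ _ hiN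
  obtain ⟨hlen3, hge1⟩ := hparts _ hmempick
  obtain ⟨a, b, c, habc⟩ := List.length_eq_three.mp hlen3
  have hab : b - a + 1 = r.2 := by rw [← plen_triple a b c, ← habc, hplenpick]
  set mid := PySem.Int.floordiv (a + b) 2 with hmid
  obtain ⟨hma, hmb⟩ := PySem.Int.floordiv_two_mid_bounds (show a ≤ b by omega)
  have hmidlt : mid < b := by
    rw [hmid, PySem.Int.floordiv_lt_iff_lt_mul (by norm_num : (0 : Int) < 2)]
    omega
  have hL1pos : 1 ≤ mid - a + 1 := by omega
  have hL2pos : 1 ≤ b - mid := by omega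
  have hL1lt : mid - a + 1 < r.2 := by omega
  have hL2lt : b - mid < r.2 := by omega
  -- B's pick equals A's pick
  have hpickin : (iN : Int) ∈ Bk.getD r.2 [] := by
    have := hcomp iN hiN
    rwa [hplenpick] at this
  have hskip : pvSkipEmpty Bk M = r.2 := by
    refine skip_eq Bk M r.2 (by omega) ?_ (List.ne_nil_of_mem hpickin) ?_
    · rw [← hplenpick]; exact hM _ hmempick
    · intro L hL1 hL2
      by_contra hcon
      obtain ⟨x, hx⟩ := List.exists_mem_of_ne_nil _ hcon
      obtain ⟨i', hi', rfl, hplen'⟩ := hsound L x hx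
      have := hmax _ (getD_mem_of_lt _ _ hi')
      omega
  have hminv : (PySem.List.min? (Bk.getD r.2 []) (fun v => v)).getD 0 = (iN : Int) := by
    cases hmo : PySem.List.min? (Bk.getD r.2 []) (fun v => v) with
    | none =>
      rw [PySem.List.min?_eq_none_iff] at hmo
      rw [hmo] at hpickin
      simp at hpickin
    | some m =>
      obtain ⟨i', hi', rfl, hplen'⟩ := hsound _ _ (PySem.List.min?_mem hmo)
      have h1 : (i' : Int) ≤ (iN : Int) := PySem.List.min?_isMin hmo _ hpickin
      have h2 : ¬ i' < iN := by
        intro hcon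
        have := hpref i' hcon
        omega
      have : i' = iN := by omega
      simp [this]
  -- explicit values of both steps
  have hgetpick : PySem.List.pyGetD (c0 :: rest) (r.1) [] = [a, b, c] := by
    rw [hri, PySem.List.pyGetD_natCast, habc]
  have hA : pvAstep (c0 :: rest) (jj + 2) =
      (c0 :: rest).set iN [a, mid, c] ++ [[mid + 1, b, jj + 2]] := by
    simp only [pvAstep, PySem.List.enumerate_cons, List.drop_succ_cons,
      PySem.List.pyGetD_zero_cons, List.drop_zero, zero_add]
    rw [← hr, hgetpick, hri, PySem.List.pySetD_natCast, pyGetD3_0, pyGetD3_1,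
      pySetD3_1, ← hmid]
  have hB : pvBstep (c0 :: rest, Bk, M) jj =
      ((c0 :: rest).set iN [a, mid, c] ++ [[mid + 1, b, jj + 2]],
        ((Bk.insert r.2 ((Bk.getD r.2 []).erase (iN : Int))).insert (mid - a + 1)
            (((Bk.insert r.2 ((Bk.getD r.2 []).erase (iN : Int))).getD (mid - a + 1) []) ++ [(iN : Int)])).insert
          (b - mid)
          ((((Bk.insert r.2 ((Bk.getD r.2 []).erase (iN : Int))).insert (mid - a + 1)
            (((Bk.insert r.2 ((Bk.getD r.2 []).erase (iN : Int))).getD (mid - a + 1) []) ++ [(iN : Int)])).getD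
              (b - mid) []) ++ [((c0 :: rest).length : Int)]),
        r.2) := by
    simp only [pvBstep]
    rw [hskip, hminv, PySem.List.remove?_eq_some_erase _ _ hpickin, Option.getD_some,
      PySem.List.pyGetD_natCast, habc, pyGetD3_0, pyGetD3_1, pySetD3_1,
      PySem.List.pySetD_natCast, List.length_set, ← hmid]
  -- bucket invariant preservation
  set Cn := (c0 :: rest).length with hCn
  have hCnk : Cn = k + 1 := hlen
  set Bk1 := Bk.insert r.2 ((Bk.getD r.2 []).erase (iN : Int)) with hBk1
  set Bk2 := Bk1.insert (mid - a + 1) ((Bk1.getD (mid - a + 1) []) ++ [(iN : Int)]) with hBk2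
  set Bk3 := Bk2.insert (b - mid) ((Bk2.getD (b - mid) []) ++ [(Cn : Int)]) with hBk3
  set C' := (c0 :: rest).set iN [a, mid, c] ++ [[mid + 1, b, jj + 2]] with hC'
  have hL1ner : ¬ (mid - a + 1 = r.2) := by omega
  have hL2ner : ¬ (b - mid = r.2) := by omega
  have hmem1 : ∀ L x : Int, x ∈ Bk1.getD L [] ↔
      (x ∈ Bk.getD L [] ∧ ¬(L = r.2 ∧ x = (iN : Int))) := by
    intro L x
    rw [hBk1, PySem.Dict.getD_insert]
    split_ifs with hLr
    · subst hLr
      rw [(hnodup _).mem_erase_iff]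
      tauto
    · tauto
  have hnodup1 : ∀ L : Int, (Bk1.getD L []).Nodup := by
    intro L
    rw [hBk1, PySem.Dict.getD_insert]
    split_ifs with hLr
    · exact (hnodup _).erase _
    · exact hnodup L
  have hmem2 : ∀ L x : Int, x ∈ Bk2.getD L [] ↔
      ((L = mid - a + 1 ∧ x = (iN : Int)) ∨
        (x ∈ Bk.getD L [] ∧ ¬(L = r.2 ∧ x = (iN : Int)))) := by
    intro L x
    rw [hBk2, PySem.Dict.getD_insert]
    split_ifs with hL1
    · rw [List.mem_append, hmem1, List.mem_singleton]
      subst hL1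
      constructor
      · rintro (⟨hx, _⟩ | rfl)
        · exact Or.inr ⟨hx, by tauto⟩
        · exact Or.inl ⟨rfl, rfl⟩
      · rintro (⟨_, rfl⟩ | ⟨hx, hne⟩)
        · exact Or.inr rfl
        · exact Or.inl ⟨hx, by tauto⟩
    · rw [hmem1]
      tauto
  have hnodup2 : ∀ L : Int, (Bk2.getD L []).Nodup := by
    intro L
    rw [hBk2, PySem.Dict.getD_insert]
    split_ifs with hL1
    · simp only [List.nodup_append, List.nodup_cons, List.nodup_nil, and_true, true_and]
      refine ⟨hnodup1 _, by simp, ?_⟩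
      intro x hx y hy
      rcases List.mem_singleton.mp hy with rfl
      rw [hmem1] at hx
      obtain ⟨hxin, _⟩ := hx
      obtain ⟨i', hi', hcast, hplen'⟩ := hsound _ _ hxin
      intro hxe
      rw [hxe] at hcast
      have : i' = iN := by omega
      subst this
      omega
    · exact hnodup1 L
  have hmem3 : ∀ L x : Int, x ∈ Bk3.getD L [] ↔
      ((L = b - mid ∧ x = (Cn : Int)) ∨ (L = mid - a + 1 ∧ x = (iN : Int)) ∨
        (x ∈ Bk.getD L [] ∧ ¬(L = r.2 ∧ x = (iN : Int)))) := by
    intro L x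
    rw [hBk3, PySem.Dict.getD_insert]
    split_ifs with hL2
    · rw [List.mem_append, hmem2, List.mem_singleton]
      subst hL2
      constructor
      · rintro ((⟨hq, rfl⟩ | ⟨hx, hne⟩) | rfl)
        · exact Or.inr (Or.inl ⟨hq, rfl⟩)
        · exact Or.inr (Or.inr ⟨hx, hne⟩)
        · exact Or.inl ⟨rfl, rfl⟩
      · rintro (⟨_, rfl⟩ | ⟨hq, rfl⟩ | ⟨hx, hne⟩)
        · exact Or.inr rfl
        · exact Or.inl (Or.inl ⟨hq, rfl⟩)
        · exact Or.inl (Or.inr ⟨hx, hne⟩)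
    · rw [hmem2]
      tauto
  have hmem2bound : ∀ L x : Int, x ∈ Bk2.getD L [] → ∃ i' : Nat, i' < Cn ∧ x = (i' : Int) := by
    intro L x hx
    rw [hmem2] at hx
    rcases hx with ⟨_, rfl⟩ | ⟨hx, _⟩
    · exact ⟨iN, hiN, rfl⟩
    · obtain ⟨i', hi', rfl, _⟩ := hsound _ _ hx
      exact ⟨i', hi', rfl⟩
  have hnodup3 : ∀ L : Int, (Bk3.getD L []).Nodup := by
    intro L
    rw [hBk3, PySem.Dict.getD_insert]
    split_ifs with hL2
    · simp only [List.nodup_append, List.nodup_cons, List.nodup_nil, and_true, true_and]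
      refine ⟨hnodup2 _, by simp, ?_⟩
      intro x hx y hy
      rcases List.mem_singleton.mp hy with rfl
      obtain ⟨i', hi', rfl⟩ := hmem2bound _ _ hx
      omega
    · exact hnodup2 L
  -- cluster access facts
  have hC'len : C'.length = (k + 1) + 1 := by
    rw [hC', List.length_append, List.length_set, ← hCn, hCnk]
    simp
  have hC'getlt : ∀ idx : Nat, idx < Cn →
      C'.getD idx [] = if idx = iN then [a, mid, c] else (c0 :: rest).getD idx [] := by
    intro idx hidx
    rw [hC', List.getD_append _ _ _ idx (by rw [List.length_set]; exact hidx),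
      List.getD_eq_getElem _ _ (by rw [List.length_set]; exact hidx), List.getElem_set]
    split_ifs with h1 h2 h2
    · rfl
    · omega
    · omega
    · exact (List.getD_eq_getElem _ _ hidx).symm
  have hC'getlast : C'.getD Cn [] = [mid + 1, b, jj + 2] := by
    have := getD_append_cons ((c0 :: rest).set iN [a, mid, c]) [] [mid + 1, b, jj + 2]
    rwa [List.length_set] at this
  have hplenpick' : plen ((c0 :: rest).getD iN []) = r.2 := hplenpick
  -- assemble
  refine ⟨by rw [hA, hB], ?_⟩
  rw [hB]
  show SInv C' Bk3 r.2 (k + 1)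
  refine ⟨hC'len, ?_, ?_, ?_, ?_, ?_, ?_⟩
  · -- parts are 3-long with positive length
    intro p hp
    rw [hC'] at hp
    rcases List.mem_append.mp hp with hp | hp
    · rcases mem_of_mem_set _ _ _ _ hp with rfl | hp
      · exact ⟨by simp, by rw [plen_triple]; omega⟩
      · exact hparts p hp
    · rcases List.mem_singleton.mp hp with rfl
      exact ⟨by simp, by rw [plen_triple]; omega⟩
  · -- total length 360
    rw [hC', List.map_append, List.sum_append, sum_map_set _ iN _ hiN]
    rw [← List.getD_eq_getElem _ ([] : List Int) hiN, hplenpick']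
    rw [show (List.map plen [[mid + 1, b, jj + 2]]).sum = plen [mid + 1, b, jj + 2] by simp]
    rw [plen_triple, plen_triple]
    omega
  · -- all lengths bounded by the new curmax r.2
    intro p hp
    rw [hC'] at hp
    rcases List.mem_append.mp hp with hp | hp
    · rcases mem_of_mem_set _ _ _ _ hp with rfl | hp
      · rw [plen_triple]; omega
      · exact hmax p hp
    · rcases List.mem_singleton.mp hp with rfl
      rw [plen_triple]; omega
  · -- soundness of the new buckets
    intro L x hx
    rw [hmem3] at hx
    rcases hx with ⟨rfl, rfl⟩ | ⟨rfl, rfl⟩ | ⟨hx, hne⟩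
    · refine ⟨Cn, by omega, rfl, ?_⟩
      rw [hC'getlast, plen_triple]
      ring
    · refine ⟨iN, by omega, rfl, ?_⟩
      rw [hC'getlt iN hiN, if_pos rfl, plen_triple]
    · obtain ⟨i', hi', rfl, hplen'⟩ := hsound _ _ hx
      have hne' : i' ≠ iN := by
        intro hcon
        subst hcon
        rw [hplenpick'] at hplen'
        exact hne ⟨hplen'.symm, rfl⟩
      refine ⟨i', by omega, rfl, ?_⟩
      rw [hC'getlt i' hi', if_neg hne']
      exact hplen'
  · -- completeness of the new buckets
    intro i hi
    rw [hC'len] at hi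
    by_cases hlast : i = Cn
    · subst hlast
      rw [hC'getlast, plen_triple, hmem3]
      exact Or.inl ⟨by ring, rfl⟩
    · have hilt : i < Cn := by omega
      by_cases hpick : i = iN
      · subst hpick
        rw [hC'getlt i hilt, if_pos rfl, plen_triple, hmem3]
        exact Or.inr (Or.inl ⟨rfl, rfl⟩)
      · rw [hC'getlt i hilt, if_neg hpick, hmem3]
        refine Or.inr (Or.inr ⟨hcomp i hilt, ?_⟩)
        rintro ⟨_, hcast⟩
        exact hpick (by omega)
  · exact hnodup3

theorem stepSim' (st : List (List Int) × PySem.Dict Int (List Int) × Int) (k : Nat) (jj : Int)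
    (h : SInv st.1 st.2.1 st.2.2 k) (hk : k ≤ 358) :
    pvAstep st.1 (jj + 2) = (pvBstep st jj).1 ∧
    SInv (pvBstep st jj).1 (pvBstep st jj).2.1 (pvBstep st jj).2.2 (k + 1) := by
  obtain ⟨C, Bk, M⟩ := st
  exact stepSim C Bk M k jj h hk

theorem phaseSim (j : Nat) (hj : j ≤ 359) :
    (PySem.List.pyRange 2 ((j : Int) + 2) 1).foldl pvAstep [[0, 359, 1]] =
      ((PySem.List.pyRange 0 (j : Int) 1).foldl pvBstep pvBinit).1 ∧
    SInv ((PySem.List.pyRange 0 (j : Int) 1).foldl pvBstep pvBinit).1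
      ((PySem.List.pyRange 0 (j : Int) 1).foldl pvBstep pvBinit).2.1
      ((PySem.List.pyRange 0 (j : Int) 1).foldl pvBstep pvBinit).2.2 j := by
  induction j with
  | zero =>
    simp only [Nat.cast_zero, zero_add]
    rw [PySem.List.pyRange_one_eq_nil (le_refl 2), PySem.List.pyRange_one_eq_nil (le_refl 0)]
    refine ⟨rfl, ?_⟩
    show SInv [[0, 359, 1]] (PySem.Dict.empty.insert 360 [0]) 360 0
    refine ⟨rfl, ?_, ?_, ?_, ?_, ?_, ?_⟩
    · intro p hp
      rcases List.mem_singleton.mp hp with rfl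
      exact ⟨by simp, by rw [plen_triple]; norm_num⟩
    · simp [pvBinit, plen_triple]
    · intro p hp
      rcases List.mem_singleton.mp hp with rfl
      rw [plen_triple]; norm_num
    · intro L x hx
      rw [PySem.Dict.getD_insert] at hx
      split_ifs at hx with hL
      · rcases List.mem_singleton.mp hx with rfl
        exact ⟨0, by norm_num, rfl, by subst hL; rw [List.getD_cons_zero, plen_triple]; norm_num⟩
      · rw [PySem.Dict.getD_empty] at hx
        simp at hx
    · intro i hi
      have : i = 0 := by simpa using Nat.lt_one_iff.mp hi
      subst this
      simp only [List.getD_cons_zero]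
      rw [plen_triple, show (359 : Int) - 0 + 1 = 360 by norm_num, PySem.Dict.getD_insert,
        if_pos rfl]
      simp
    · intro L
      rw [PySem.Dict.getD_insert]
      split_ifs
      · simp
      · rw [PySem.Dict.getD_empty]; simp
  | succ j ih =>
    obtain ⟨ihA, ihS⟩ := ih (by omega)
    have hA' : PySem.List.pyRange 2 (((j + 1 : Nat) : Int) + 2) 1 =
        PySem.List.pyRange 2 ((j : Int) + 2) 1 ++ [(j : Int) + 2] := by
      rw [show ((j + 1 : Nat) : Int) + 2 = ((j : Int) + 2) + 1 by push_cast; ring]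
      exact PySem.List.pyRange_one_succ_right (by omega)
    have hB' : PySem.List.pyRange 0 ((j + 1 : Nat) : Int) 1 =
        PySem.List.pyRange 0 (j : Int) 1 ++ [(j : Int)] := by
      rw [show ((j + 1 : Nat) : Int) = (j : Int) + 1 by push_cast; ring]
      exact PySem.List.pyRange_one_succ_right (by omega)
    rw [hA', hB', List.foldl_append, List.foldl_append, ihA]
    simp only [List.foldl_cons, List.foldl_nil]
    exact stepSim' _ j (j : Int) ihS (by omega)

-- one A step on a saturated cluster appends [x0+1, x0, label]
theorem tailStep (S : List (List Int)) (x0 l : Int) (h : TInv S x0) :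
    pvAstep S l = S ++ [[x0 + 1, x0, l]] ∧ TInv (S ++ [[x0 + 1, x0, l]]) x0 := by
  obtain ⟨hne, ⟨c, hs0⟩, hle⟩ := h
  have hmid0 : PySem.Int.floordiv (x0 + x0) 2 = x0 := by
    rw [PySem.Int.floordiv_eq_iff_of_pos (by norm_num : (0 : Int) < 2)]
    omega
  cases S with
  | nil => exact absurd rfl hne
  | cons s0 rest =>
  have hs0' : s0 = [x0, x0, c] := by simpa using hs0
  subst hs0'
  constructor
  · simp only [pvAstep, PySem.List.enumerate_cons, List.drop_succ_cons, List.drop_zero,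
      zero_add, PySem.List.pyGetD_zero_cons]
    set r := List.foldl pvAscanStep ((0 : Int), PySem.List.pyGetD [x0, x0, c] 1 0 - x0 + 1)
        (PySem.List.enumerate rest 1) with hr
    rcases scanAux rest 1 0 (PySem.List.pyGetD [x0, x0, c] 1 0 - x0 + 1) with
      ⟨hfold, _⟩ | ⟨pre, q, suf, hdec, hfold, hlt, _, _⟩
    swap
    · exfalso
      rw [pyGetD3_1] at hlt
      have hq : q ∈ rest := by rw [hdec]; simp
      have := hle q (List.mem_cons_of_mem _ hq)
      omega
    rw [← hr] at hfold
    have hri : r.1 = ((0 : Nat) : Int) := by simp [hfold]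
    have hgetpick : PySem.List.pyGetD ([x0, x0, c] :: rest) r.1 [] = [x0, x0, c] := by
      rw [hri, PySem.List.pyGetD_natCast, List.getD_cons_zero]
    rw [hgetpick, hri, PySem.List.pySetD_natCast, pyGetD3_0, pyGetD3_1, pySetD3_1, hmid0,
      List.set_cons_zero]
  · refine ⟨by simp, ⟨c, ?_⟩, ?_⟩
    · rw [List.getD_append _ _ _ 0 (by simp), hs0]
    · intro p hp
      rcases List.mem_append.mp hp with hp | hp
      · exact hle p hp
      · rcases List.mem_singleton.mp hp with rfl
        rw [plen_triple]
        omega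

theorem tailFold (x0 : Int) : ∀ (k : Nat) (S : List (List Int)), TInv S x0 →
    (PySem.List.pyRange 361 (361 + (k : Int)) 1).foldl pvAstep S =
      S ++ (PySem.List.pyRange 361 (361 + (k : Int)) 1).map (fun l => [x0 + 1, x0, l]) ∧
    TInv ((PySem.List.pyRange 361 (361 + (k : Int)) 1).foldl pvAstep S) x0 := by
  intro k
  induction k with
  | zero =>
    intro S h
    rw [PySem.List.pyRange_one_eq_nil (by norm_num : 361 + ((0 : Nat) : Int) ≤ 361)]
    exact ⟨by simp, h⟩
  | succ k ih =>
    intro S h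
    obtain ⟨ihf, ihT⟩ := ih S h
    obtain ⟨hstep, hTnew⟩ := tailStep _ x0 (361 + (k : Int)) ihT
    have hrange : PySem.List.pyRange 361 (361 + ((k + 1 : Nat) : Int)) 1 =
        PySem.List.pyRange 361 (361 + (k : Int)) 1 ++ [361 + (k : Int)] := by
      rw [show 361 + ((k + 1 : Nat) : Int) = (361 + (k : Int)) + 1 by push_cast; ring]
      exact PySem.List.pyRange_one_succ_right (by omega)
    constructor
    · rw [hrange, List.foldl_append]
      simp only [List.foldl_cons, List.foldl_nil]
      rw [hstep, ihf, List.map_append]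
      simp [List.append_assoc]
    · rw [hrange, List.foldl_append]
      simp only [List.foldl_cons, List.foldl_nil]
      rw [hstep]
      exact hTnew

-- ===== VERDICT (by name: the statement is the Claim_ definition above) =====
theorem consistentHashing_spec : Claim_equal_consistentHashing := by
  intro n _
  unfold Spec_consistentHashing
  by_cases hn : n ≤ 0
  · simp [consistentHashing, consistentHashing_alt, hn]
  · by_cases h360 : n ≤ 360
    · -- at most 360 machines: the phase simulation gives the result directly
      have hj359 : (n - 1).toNat ≤ 359 := by omega
      obtain ⟨hAB, _⟩ := phaseSim (n - 1).toNat hj359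
      simp only [consistentHashing, consistentHashing_alt, if_neg hn]
      rw [show n + 1 = (((n - 1).toNat : Int)) + 2 by omega,
        show min n 360 - 1 = (((n - 1).toNat : Int)) by omega, if_neg (by omega : ¬ 360 < n)]
      exact hAB
    · -- more than 360 machines: saturated cluster plus the constant tail
      push_neg at h360
      obtain ⟨hAB, hS⟩ := phaseSim 359 (by norm_num)
      obtain ⟨hlen, hparts, hsum, hM, hsound, hcomp, hnodup⟩ := hS
      set st := (PySem.List.pyRange 0 ((359 : Nat) : Int) 1).foldl pvBstep pvBinit with hst
      have hall1 : ∀ p ∈ st.1, plen p = 1 := by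
        intro p hp
        refine all_one_of_sum_eq_length (st.1.map plen) ?_ ?_ (plen p) (List.mem_map_of_mem hp)
        · intro x hx
          rcases List.mem_map.mp hx with ⟨q, hq, rfl⟩
          exact (hparts q hq).2
        · rw [hsum, List.length_map, hlen]
          norm_num
      have hlen' : st.1.length = 360 := by rw [hlen]
      have h0lt : 0 < st.1.length := by omega
      have hmem0 : st.1.getD 0 [] ∈ st.1 := getD_mem_of_lt _ _ h0lt
      obtain ⟨hl3, _⟩ := hparts _ hmem0
      obtain ⟨a, b, c, habc⟩ := List.length_eq_three.mp hl3
      have hone : plen (st.1.getD 0 []) = 1 := hall1 _ hmem0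
      have hba : b = a := by
        rw [habc, plen_triple] at hone
        omega
      rw [hba] at habc
      have hT : TInv st.1 a := by
        refine ⟨?_, ⟨c, habc⟩, fun p hp => le_of_eq (hall1 p hp)⟩
        intro hcon
        rw [hcon] at hlen'
        simp at hlen'
      have hskip1 : pvSkipEmpty st.2.1 st.2.2 = 1 := by
        refine skip_eq _ _ 1 le_rfl ?_ ?_ ?_
        · rw [← hone]
          exact hM _ hmem0
        · have := hcomp 0 h0lt
          rw [hone] at this
          exact List.ne_nil_of_mem this
        · intro L h1L hLM
          by_contra hcon
          obtain ⟨x, hx⟩ := List.exists_mem_of_ne_nil _ hcon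
          obtain ⟨i', hi', rfl, hplen'⟩ := hsound L x hx
          have := hall1 _ (getD_mem_of_lt _ _ hi')
          omega
      have hmin1 : (PySem.List.min? (st.2.1.getD 1 []) (fun v => v)).getD 0 = ((0 : Nat) : Int) := by
        have h0in : ((0 : Nat) : Int) ∈ st.2.1.getD 1 [] := by
          have := hcomp 0 h0lt
          rwa [hone] at this
        cases hmo : PySem.List.min? (st.2.1.getD 1 []) (fun v => v) with
        | none =>
          rw [PySem.List.min?_eq_none_iff] at hmo
          rw [hmo] at h0in
          simp at h0in
        | some m =>
          obtain ⟨i', hi', rfl, _⟩ := hsound _ _ (PySem.List.min?_mem hmo)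
          have h1 : (i' : Int) ≤ ((0 : Nat) : Int) := PySem.List.min?_isMin hmo _ h0in
          have : i' = 0 := by omega
          simp [this]
      have hx0 : PySem.List.pyGetD (PySem.List.pyGetD st.1 ((0 : Nat) : Int) []) 0 0 = a := by
        rw [PySem.List.pyGetD_natCast, habc, pyGetD3_0]
      obtain ⟨hf, _⟩ := tailFold a ((n - 360).toNat) st.1 hT
      simp only [consistentHashing, consistentHashing_alt, if_neg hn]
      rw [show min n 360 - 1 = ((359 : Nat) : Int) by omega, if_pos (by omega : 360 < n), ← hst,
        hskip1, hmin1, hx0,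
        PySem.List.pyRange_one_append 2 361 (n + 1) (by norm_num) (by omega), List.foldl_append,
        show (361 : Int) = ((359 : Nat) : Int) + 2 by norm_num, hAB]
      rw [show ((359 : Nat) : Int) + 2 = (361 : Int) by norm_num,
        show n + 1 = 361 + (((n - 360).toNat : Int)) by omega]
      exact hf
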